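-- pv_equiv track=rewrite | github.com/TomiIsojarvi/MOOC-Ohjelmoinnin-perusteet-2023-Python | Osa 4/osa04-25_naapureita_listassa/src/naapureita_listassa.py | pisin_naapurijono
-- ===== SOURCE A (Python) =====
-- def pisin_naapurijono(lista):
-- 	temp = []
-- 	#temp.append(lista[0])
--
-- 	pituus = 0
-- 	naapurit = []
--
-- 	for x in range(1, len(lista)):
-- 		if len(temp) == 0:
-- 				temp.append(lista[x-1])
--
-- 		if lista[x] == lista[x - 1] + 1 or lista[x] == lista[x - 1] - 1:
-- 			temp.append(lista[x])
-- 			if len(temp) > pituus: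
-- 				naapurit = temp.copy()
-- 				pituus = len(naapurit)
-- 		else:
-- 			temp = []
--
-- 	return pituus
-- ===== SOURCE B (Python) =====
-- def pisin_naapurijono(lista):
--     n = len(lista)
--     if n == 0:
--         return 0
--     # stage 1: positions where the +/-1 chain breaks (cut points), plus the two ends
--     cuts = [0]
--     for i in range(1, n):
--         if abs(lista[i] - lista[i - 1]) != 1:
--             cuts.append(i)
--     cuts.append(n)
--     # stage 2: the answer is the widest gap between consecutive cuts (a chain needs >= 2 elements)
--     best = max(b - a for a, b in zip(cuts, cuts[1:]))
--     return best if best >= 2 else 0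
-- ===== Notes on version B (the rewrite author's own statement) =====
-- stated objective: alternative
-- what changed: B is a staged cut-point algorithm: it first collects the list of indices where the +/-1 chain breaks (plus both ends), then returns the widest gap between consecutive cut points (0 if no gap reaches 2), instead of A's single pass that grows/resets a temp list and copies it on each new record.
import Mathlib
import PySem

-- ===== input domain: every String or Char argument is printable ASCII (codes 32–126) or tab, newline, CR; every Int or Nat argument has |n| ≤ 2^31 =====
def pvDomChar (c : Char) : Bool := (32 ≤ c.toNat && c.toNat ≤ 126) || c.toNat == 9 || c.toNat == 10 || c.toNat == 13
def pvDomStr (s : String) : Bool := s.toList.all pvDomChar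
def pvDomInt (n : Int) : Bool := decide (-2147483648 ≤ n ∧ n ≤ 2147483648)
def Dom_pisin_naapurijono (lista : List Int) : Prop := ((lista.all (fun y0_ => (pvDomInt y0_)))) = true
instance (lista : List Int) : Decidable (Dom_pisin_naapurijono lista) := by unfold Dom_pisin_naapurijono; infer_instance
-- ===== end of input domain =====

-- B replaces A's single growing/copying temp-list pass by a staged cut-point algorithm:
-- collect the break indices of the +/-1 chain, then take the widest gap between consecutive cuts.

-- ===== PORT A =====
-- loop body of A's 'for x in range(1, len(lista))'; state = (temp, pituus, naapurit).
-- indices x and x-1 are always in range there, so pyGetD … 0 is exact.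
def pvStepA (lista : List Int) (st : List Int × Int × List Int) (x : Int) :
    List Int × Int × List Int :=
  let temp := st.1
  let pituus := st.2.1
  let naapurit := st.2.2
  let temp := if temp.length = 0 then temp ++ [PySem.List.pyGetD lista (x - 1) 0] else temp
  if PySem.List.pyGetD lista x 0 = PySem.List.pyGetD lista (x - 1) 0 + 1 ∨
     PySem.List.pyGetD lista x 0 = PySem.List.pyGetD lista (x - 1) 0 - 1 then
    let temp := temp ++ [PySem.List.pyGetD lista x 0]
    if (temp.length : Int) > pituus then (temp, (temp.length : Int), temp)
    else (temp, pituus, naapurit)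
  else ([], pituus, naapurit)

def pisin_naapurijono (lista : List Int) : Int :=
  ((PySem.List.pyRange 1 (lista.length : Int) 1).foldl (pvStepA lista) ([], 0, [])).2.1

-- ===== PORT B =====
-- loop body of B's 'for i in range(1, n)': append a cut where abs(lista[i]-lista[i-1]) != 1
def pvCutStep (lista : List Int) (cuts : List Int) (i : Int) : List Int :=
  if ¬ (|PySem.List.pyGetD lista i 0 - PySem.List.pyGetD lista (i - 1) 0| = 1) then
    cuts ++ [i]
  else cuts

def pisin_naapurijono_alt (lista : List Int) : Int :=
  let n : Int := (lista.length : Int)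
  if n = 0 then 0
  else
    let cuts := (PySem.List.pyRange 1 n 1).foldl (pvCutStep lista) [(0 : Int)]
    let cuts := cuts ++ [n]
    -- max(b - a for a, b in zip(cuts, cuts[1:])): cuts always has ≥ 2 elements, so the
    -- generator is nonempty and max? is some; the getD 0 default is never used.
    let best := (PySem.List.max?
      ((cuts.zip (PySem.List.slice cuts (some 1) none)).map (fun p => p.2 - p.1))
      (fun y => y)).getD 0
    if best ≥ 2 then best else 0

-- ===== PRECONDITION & SPEC =====
def Spec_pisin_naapurijono (lista : List Int) (out : Int) : Prop := out = pisin_naapurijono_alt lista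
instance (lista : List Int) (out : Int) : Decidable (Spec_pisin_naapurijono lista out) := by unfold Spec_pisin_naapurijono; infer_instance

-- ===== CLAIM (what is proved, stated in full; the proofs are below) =====
def Claim_equal_pisin_naapurijono : Prop := ∀ (lista : List Int), Dom_pisin_naapurijono lista → Spec_pisin_naapurijono lista (pisin_naapurijono lista)

-- ===== LEMMAS AND PROOFS =====

-- the successive differences of the cut list, and their running maximum from 0
def pvDiffs (c : List Int) : List Int := (c.zip c.tail).map (fun p => p.2 - p.1)

def pvM (c : List Int) : Int := (pvDiffs c).foldl max 0

theorem pvDiffs_cons_cons (a b : Int) (u : List Int) :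
    pvDiffs (a :: b :: u) = (b - a) :: pvDiffs (b :: u) := by
  simp [pvDiffs]

theorem pvDiffs_append (c : List Int) (s x : Int) (h : c.getLast? = some s) :
    pvDiffs (c ++ [x]) = pvDiffs c ++ [x - s] := by
  induction c with
  | nil => simp at h
  | cons a t ih =>
    cases t with
    | nil => simp at h; subst h; simp [pvDiffs]
    | cons b r =>
      have ht : (b :: r).getLast? = some s := by
        simpa [List.getLast?_cons_cons] using h
      have := ih ht
      simp only [List.cons_append] at *
      rw [pvDiffs_cons_cons, this, pvDiffs_cons_cons]
      simp

theorem pvM_append (c : List Int) (s x : Int) (h : c.getLast? = some s) :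
    pvM (c ++ [x]) = max (pvM c) (x - s) := by
  simp [pvM, pvDiffs_append c s x h]

-- coupling invariant after processing indices 1..k:
-- A's state (temp, pituus, _) vs B's cut list c; s = last cut = start of the current run.
def pvInv (k : Nat) (a : List Int × Int × List Int) (c : List Int) : Prop :=
  ∃ s : Nat, s ≤ k ∧ c.getLast? = some (s : Int) ∧ (∀ y ∈ pvDiffs c, 1 ≤ y) ∧
    ((a.1.length : Int) = if s = k then 0 else (k : Int) - s + 1) ∧
    (a.2.1 = if 2 ≤ max (pvM c) ((k : Int) - s + 1) then max (pvM c) ((k : Int) - s + 1) else 0)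

theorem pvM_nonneg (c : List Int) : 0 ≤ pvM c := (PySem.List.le_foldl_max (pvDiffs c) 0).1

theorem pvStep_inv (lista : List Int) (k : Nat) (a : List Int × Int × List Int)
    (c : List Int) (h : pvInv k a c) :
    pvInv (k + 1) (pvStepA lista a ((k : Int) + 1)) (pvCutStep lista c ((k : Int) + 1)) := by
  obtain ⟨s, hs, hlast, hdiffs, hlen, hpit⟩ := h
  obtain ⟨temp, pituus, naapurit⟩ := a
  simp only at hlen hpit
  have hM0 : 0 ≤ pvM c := pvM_nonneg c
  simp only [pvStepA, pvCutStep]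
  by_cases hP : PySem.List.pyGetD lista ((k : Int) + 1) 0 =
        PySem.List.pyGetD lista ((k : Int) + 1 - 1) 0 + 1 ∨
      PySem.List.pyGetD lista ((k : Int) + 1) 0 =
        PySem.List.pyGetD lista ((k : Int) + 1 - 1) 0 - 1
  · -- neighbors at (k, k+1): the cut list is unchanged, A extends temp
    have h1 : |PySem.List.pyGetD lista ((k : Int) + 1) 0 -
        PySem.List.pyGetD lista ((k : Int) + 1 - 1) 0| = 1 := by
      rcases hP with h | h <;> rw [h] <;> simp
    rw [if_pos hP, if_neg (not_not_intro h1)]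
    refine ⟨s, by omega, hlast, hdiffs, ?_, ?_⟩
    · split_ifs at hlen hpit ⊢ <;>
        simp only [List.length_append, List.length_cons, List.length_nil] at * <;> omega
    · split_ifs at hlen hpit ⊢ <;>
        simp only [List.length_append, List.length_cons, List.length_nil] at * <;> omega
  · -- break at (k, k+1): B appends a cut at k+1, A resets temp
    have h1 : ¬ |PySem.List.pyGetD lista ((k : Int) + 1) 0 -
        PySem.List.pyGetD lista ((k : Int) + 1 - 1) 0| = 1 := by
      intro habs
      rcases (abs_eq (by norm_num : (0:Int) ≤ 1)).mp habs with h | h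
      · exact hP (Or.inl (by omega))
      · exact hP (Or.inr (by omega))
    rw [if_neg hP, if_pos h1]
    refine ⟨k + 1, le_refl _, ?_, ?_, ?_, ?_⟩
    · rw [List.getLast?_concat]; push_cast; ring_nf
    · rw [pvDiffs_append c (s : Int) _ hlast]
      intro y hy
      rcases List.mem_append.mp hy with hy | hy
      · exact hdiffs y hy
      · simp only [List.mem_singleton] at hy; omega
    · simp
    · rw [pvM_append c (s : Int) _ hlast]
      split_ifs at hpit ⊢ <;> push_cast at * <;> omega

theorem pv_main (lista : List Int) (k : Nat) :
    pvInv k ((PySem.List.pyRange 1 (1 + (k : Int)) 1).foldl (pvStepA lista) ([], 0, []))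
          ((PySem.List.pyRange 1 (1 + (k : Int)) 1).foldl (pvCutStep lista) [(0 : Int)]) := by
  induction k with
  | zero =>
      rw [show (1 + ((0 : Nat) : Int)) = 1 by norm_num,
          PySem.List.pyRange_one_eq_nil (le_refl 1)]
      exact ⟨0, le_refl 0, by simp, by simp [pvDiffs], by simp, by simp [pvM, pvDiffs]⟩
  | succ k ih =>
      rw [show (1 + ((k + 1 : Nat) : Int)) = (1 + (k : Int)) + 1 by push_cast; ring,
          PySem.List.pyRange_one_succ_right (by omega)]
      simp only [List.foldl_append, List.foldl_cons, List.foldl_nil]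
      have h3 : (1 : Int) + (k : Int) = (k : Int) + 1 := by ring
      rw [h3] at ih ⊢
      exact pvStep_inv lista k _ _ ih

-- ===== VERDICT (by name: the statement is the Claim_ definition above) =====
theorem pisin_naapurijono_spec : Claim_equal_pisin_naapurijono := by
  intro lista _
  unfold Spec_pisin_naapurijono pisin_naapurijono pisin_naapurijono_alt
  rcases hl : lista.length with _ | m
  · rw [show (((0 : Nat) : Int)) = 0 from rfl, PySem.List.pyRange_one_eq_nil (by norm_num)]
    norm_num
  · rw [show (((m + 1 : Nat)) : Int) = 1 + (m : Int) by push_cast; ring]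
    obtain ⟨s, hs, hlast, hdiffs, _, hpit⟩ := pv_main lista m
    set cuts := (PySem.List.pyRange 1 (1 + (m : Int)) 1).foldl (pvCutStep lista) [(0 : Int)] with hc
    have hn0 : ¬ (1 + (m : Int) = 0) := by omega
    rw [if_neg hn0]
    simp only []
    rw [PySem.List.slice_from_one]
    have hdz : ((cuts ++ [1 + (m : Int)]).zip (cuts ++ [1 + (m : Int)]).tail).map
        (fun p => p.2 - p.1) = pvDiffs (cuts ++ [1 + (m : Int)]) := rfl
    rw [hdz, pvDiffs_append cuts (s : Int) _ hlast]
    have hMapp : pvM (cuts ++ [1 + (m : Int)]) = max (pvM cuts) (1 + (m : Int) - s) :=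
      pvM_append cuts (s : Int) _ hlast
    have hM0 : 0 ≤ pvM cuts := pvM_nonneg cuts
    rcases hdc : pvDiffs cuts with _ | ⟨d0, dr⟩
    · have hMc : pvM cuts = 0 := by simp [pvM, hdc]
      simp only [List.nil_append, PySem.List.max?_id_cons, List.foldl_nil, Option.getD_some]
      rw [hpit, hMc]
      split_ifs <;> omega
    · have hd0 : 1 ≤ d0 := hdiffs d0 (by rw [hdc]; exact List.mem_cons_self ..)
      have hfold : (dr ++ [1 + (m : Int) - (s : Int)]).foldl max d0
          = max (pvM cuts) (1 + (m : Int) - (s : Int)) := by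
        have h1 : pvDiffs (cuts ++ [1 + (m : Int)]) = d0 :: (dr ++ [1 + (m : Int) - (s : Int)]) := by
          rw [pvDiffs_append cuts (s : Int) _ hlast, hdc]; simp
        have h2 := hMapp
        rw [pvM, h1, List.foldl_cons, show max 0 d0 = d0 by omega] at h2
        exact h2
      simp only [List.cons_append, PySem.List.max?_id_cons, Option.getD_some]
      rw [hfold, hpit]
      split_ifs <;> omega
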